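-- pv_equiv track=rewrite | github.com/coyote240/2048Solver | board.py | _reverse_shift_rows
-- ===== SOURCE A (Python) =====
-- def collapse_row(row):
--     '''Collapse a row, being a list of <size> values, combining
--     like cells as appropriate to the game.
--     This function assumes that the collapse and score action is always
--     a right-to-left operation.  All methods that employ this function assume
--     responsibility for ensuring so.
--
--     Returns a tuple containing the new row and the operation's score.
--     Returns a score of None if the row could not be collapsed.
--     '''
--     size = len(row)
--     filled_cells = [x for x in row if x is not None]
--     output, score = _collapse_row_aux(filled_cells, [], 0)
--     output = _pad_row(output, size)
--
--     if output == row: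
--         score = None
--
--     return output, score
--
-- def _collapse_row_aux(input_list, output_list, score):
--     if len(input_list) > 1:
--         (a, b), rest = input_list[:2], input_list[2:]
--         if a == b:
--             c = a + b
--             score += c
--             output_list.append(c)
--             output_list, score = _collapse_row_aux(
--                 rest, output_list, score)
--         else:
--             output_list.append(a)
--             output_list, score = _collapse_row_aux(
--                 [b] + rest, output_list, score)
--     elif len(input_list) is 1:
--         output_list.append(input_list[0])
--
--     return output_list, score
--
-- def _pad_row(row, size):
--     return row + ([None] * (size - len(row)))
--
-- def _reverse_shift_rows(rows):
--     move_score = None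
--
--     for index, row in enumerate(rows):
--         rows[index].reverse()
--         rows[index], score = collapse_row(row)
--         rows[index].reverse()
--         if score is not None:
--             if move_score is None:
--                 move_score = 0
--             move_score += score
--
--     return rows, move_score
-- ===== SOURCE B (Python) =====
-- def _collapse(row):
--     size = len(row)
--     filled = [x for x in row if x is not None]
--     # run-length encode consecutive equal values
--     runs = []
--     for x in filled:
--         if runs and runs[-1][0] == x:
--             runs[-1][1] += 1
--         else:
--             runs.append([x, 1])
--     merged = []
--     score = 0
--     for v, k in runs:
--         merged += [2 * v] * (k // 2)
--         if k % 2 == 1: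
--             merged.append(v)
--         score += 2 * v * (k // 2)
--     out = merged + [None] * (size - len(merged))
--     return out, (None if out == row else score)
--
-- def _reverse_shift_rows(rows):
--     move_score = None
--     for i, row in enumerate(rows):
--         out, score = _collapse(row[::-1])
--         rows[i] = out[::-1]
--         if score is not None:
--             move_score = (move_score or 0) + score
--     return rows, move_score
-- ===== Notes on version B (the rewrite author's own statement) =====
-- stated objective: faster
-- what changed: Replaces the recursive two-at-a-time pairwise merge helper (_collapse_row_aux, which rebuilds [b]+rest on every step) by a run-length-encoding pass: group consecutive equal filled cells into runs, then emit k//2 merged cells and k%2 singles per run with score 2*v*(k//2); B reassigns fresh reversed lists instead of reversing inner rows in place, so equivalence is about the return value.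
import Mathlib
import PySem

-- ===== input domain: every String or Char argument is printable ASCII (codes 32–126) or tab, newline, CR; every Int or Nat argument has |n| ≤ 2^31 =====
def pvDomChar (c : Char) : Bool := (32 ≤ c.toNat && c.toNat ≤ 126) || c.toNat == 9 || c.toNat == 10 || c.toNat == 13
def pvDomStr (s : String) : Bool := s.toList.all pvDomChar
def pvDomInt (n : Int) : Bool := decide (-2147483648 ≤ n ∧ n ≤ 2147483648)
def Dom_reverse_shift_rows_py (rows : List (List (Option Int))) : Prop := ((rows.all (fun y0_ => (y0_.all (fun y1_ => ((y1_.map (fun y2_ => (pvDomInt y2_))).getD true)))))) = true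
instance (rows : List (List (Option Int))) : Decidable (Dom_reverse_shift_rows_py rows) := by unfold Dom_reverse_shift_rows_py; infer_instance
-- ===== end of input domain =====

-- B replaces the recursive pairwise-merge helper by a run-length-encoding pass (group equal
-- neighbours, emit k/2 merged cells and k%2 singles per run); equivalence is about the RETURN
-- value only — A reverses the original inner row lists in place, B reassigns fresh lists.

-- ===== PORT A =====
-- _collapse_row_aux: recursion on the input list, appending to output_list
def pvAux : List Int → List Int → Int → List Int × Int
  | a :: b :: rest, out, score =>
      if a = b then
        pvAux rest (out ++ [a + b]) (score + (a + b))
      else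
        pvAux (b :: rest) (out ++ [a]) score
  | [a], out, score => (out ++ [a], score)
  | [], out, score => (out, score)

-- collapse_row: filled cells, aux, pad with None, score=None if unchanged
def pvCollapseRow (row : List (Option Int)) : List (Option Int) × Option Int :=
  let size := row.length
  let filled := row.filterMap id
  let os := pvAux filled [] 0
  let output := os.1.map some ++ List.replicate (size - os.1.length) none
  (output, if output = row then none else some os.2)

def reverse_shift_rows_py (rows : List (List (Option Int))) : List (List (Option Int)) × Option Int :=
  rows.foldl
    (fun acc row =>
      let rrow := row.reverse
      let rsc := pvCollapseRow rrow
      let newRow := rsc.1.reverse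
      (acc.1 ++ [newRow],
       match rsc.2 with
       | none => acc.2
       | some s => some (acc.2.getD 0 + s)))
    ([], none)

-- ===== PORT B =====
-- run-length encoding step: extend the last run or start a new one (Python's runs[-1][1] += 1)
def pvPush (rs : List (Int × Nat)) (x : Int) : List (Int × Nat) :=
  match rs.getLast? with
  | some (v, k) => if v = x then rs.dropLast ++ [(v, k + 1)] else rs ++ [(x, 1)]
  | none => [(x, 1)]

-- second loop of B: emit k/2 merged cells and k%2 singles per run and accumulate the score
-- (run lengths are list counts, so Nat with Nat division matches Python's nonnegative k // 2)
def pvExpandStep (acc : List Int × Int) (vk : Int × Nat) : List Int × Int :=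
  (acc.1 ++ List.replicate (vk.2 / 2) (2 * vk.1) ++ (if vk.2 % 2 = 1 then [vk.1] else []),
   acc.2 + 2 * vk.1 * ((vk.2 / 2 : Nat) : Int))

def pvCollapseAlt (row : List (Option Int)) : List (Option Int) × Option Int :=
  let size := row.length
  let filled := row.filterMap id
  let runs := filled.foldl pvPush []
  let ms := runs.foldl pvExpandStep ([], 0)
  let out := ms.1.map some ++ List.replicate (size - ms.1.length) none
  (out, if out = row then none else some ms.2)

def reverse_shift_rows_py_alt (rows : List (List (Option Int))) : List (List (Option Int)) × Option Int :=
  rows.foldl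
    (fun acc row =>
      let osc := pvCollapseAlt row.reverse
      (acc.1 ++ [osc.1.reverse],
       match osc.2 with
       | none => acc.2
       | some s => some (acc.2.getD 0 + s)))
    ([], none)

-- ===== PRECONDITION & SPEC =====
def Spec_reverse_shift_rows_py (rows : List (List (Option Int))) (out : List (List (Option Int)) × Option Int) : Prop := out = reverse_shift_rows_py_alt rows
instance (rows : List (List (Option Int))) (out : List (List (Option Int)) × Option Int) : Decidable (Spec_reverse_shift_rows_py rows out) := by unfold Spec_reverse_shift_rows_py; infer_instance

-- ===== CLAIM (what is proved, stated in full; the proofs are below) =====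
def Claim_equal_reverse_shift_rows_py : Prop := ∀ (rows : List (List (Option Int))), Dom_reverse_shift_rows_py rows → Spec_reverse_shift_rows_py rows (reverse_shift_rows_py rows)

-- ===== LEMMAS AND PROOFS =====

-- reference merge: what both collapse helpers compute on the filled cells
def pvMrg : List Int → List Int × Int
  | a :: b :: r =>
      if a = b then ((a + b) :: (pvMrg r).1, (a + b) + (pvMrg r).2)
      else (a :: (pvMrg (b :: r)).1, (pvMrg (b :: r)).2)
  | [a] => ([a], 0)
  | [] => ([], 0)

-- left-to-right run decomposition
def pvRunsL : List Int → List (Int × Nat)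
  | [] => []
  | x :: xs =>
      (x, 1 + (xs.takeWhile (fun y => y == x)).length) :: pvRunsL (xs.dropWhile (fun y => y == x))
termination_by l => l.length
decreasing_by
  simpa using Nat.lt_succ_of_le (List.length_dropWhile_le _ _)

-- recursive form of B's expand loop
def pvExpandAll : List (Int × Nat) → List Int × Int
  | [] => ([], 0)
  | (v, k) :: rs =>
      (List.replicate (k / 2) (2 * v) ++ (if k % 2 = 1 then [v] else []) ++ (pvExpandAll rs).1,
       2 * v * ((k / 2 : Nat) : Int) + (pvExpandAll rs).2)

theorem pvRunsL_cons (x : Int) (xs : List Int) :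
    pvRunsL (x :: xs)
      = (x, 1 + (xs.takeWhile (fun y => y == x)).length)
          :: pvRunsL (xs.dropWhile (fun y => y == x)) := by
  rw [pvRunsL]

theorem pvAux_eq (l : List Int) : ∀ (out : List Int) (s : Int),
    pvAux l out s = (out ++ (pvMrg l).1, s + (pvMrg l).2) := by
  induction l using pvMrg.induct with
  | case1 b r ih =>
      intro out s
      simp [pvAux, pvMrg, ih, List.append_assoc]
      omega
  | case2 a b r hab ih =>
      intro out s
      simp [pvAux, pvMrg, hab, ih]
  | case3 a => intro out s; simp [pvAux, pvMrg]
  | case4 => intro out s; simp [pvAux, pvMrg]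

theorem pvPush_foldl_pre (l : List Int) : ∀ (rs : List (Int × Nat)) (v : Int) (k : Nat),
    List.foldl pvPush (rs ++ [(v, k)]) l
      = rs ++ (v, k + (l.takeWhile (fun y => y == v)).length)
          :: pvRunsL (l.dropWhile (fun y => y == v)) := by
  induction l with
  | nil => intro rs v k; simp [pvRunsL]
  | cons x xs ih =>
      intro rs v k
      by_cases hvx : v = x
      · subst hvx
        simp only [List.foldl_cons, pvPush, List.getLast?_concat, List.dropLast_concat,
          ih, List.takeWhile_cons, List.dropWhile_cons, beq_self_eq_true,
          if_true, List.length_cons]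
        have h : ∀ t : Nat, v = v ∧ k + 1 + t = k + (t + 1) := fun t => ⟨rfl, by omega⟩
        rw [(h _).2]
      · have hbx : (x == v) = false := by
          simp only [beq_eq_false_iff_ne]; exact fun h => hvx h.symm
        simp only [List.foldl_cons, pvPush, List.getLast?_concat, List.dropLast_concat,
          if_neg hvx, List.takeWhile_cons, List.dropWhile_cons, hbx]
        rw [show rs ++ [(v, k)] ++ [(x, 1)] = (rs ++ [(v, k)]) ++ [(x, 1)] by simp, ih]
        simp [pvRunsL_cons]

theorem pvPush_foldl (l : List Int) : List.foldl pvPush [] l = pvRunsL l := by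
  cases l with
  | nil => simp [pvRunsL]
  | cons x xs =>
      have h := pvPush_foldl_pre xs (rs := []) (v := x) (k := 1)
      simpa [pvPush, pvRunsL_cons, Nat.add_comm] using h

theorem pvExpand_foldl (rs : List (Int × Nat)) : ∀ (acc : List Int × Int),
    List.foldl pvExpandStep acc rs = (acc.1 ++ (pvExpandAll rs).1, acc.2 + (pvExpandAll rs).2) := by
  induction rs with
  | nil => intro acc; simp [pvExpandAll]
  | cons vk rest ih =>
      intro acc
      obtain ⟨v, k⟩ := vk
      simp [pvExpandStep, pvExpandAll, ih, List.append_assoc]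
      ring

theorem pvExpandAll_zero (v : Int) (rs : List (Int × Nat)) :
    pvExpandAll ((v, 0) :: rs) = pvExpandAll rs := by
  simp [pvExpandAll]

theorem pvExpandAll_shift (v : Int) (k k' : Nat) (rs : List (Int × Nat)) (h : k = k' + 2) :
    pvExpandAll ((v, k) :: rs)
      = (2 * v :: (pvExpandAll ((v, k') :: rs)).1, 2 * v + (pvExpandAll ((v, k') :: rs)).2) := by
  subst h
  have h2 : (k' + 2) / 2 = k' / 2 + 1 := by omega
  have h3 : (k' + 2) % 2 = k' % 2 := by omega
  simp [pvExpandAll, h2, h3, List.replicate_succ]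
  ring

theorem pvMain (l : List Int) : pvExpandAll (pvRunsL l) = pvMrg l := by
  induction l using pvMrg.induct with
  | case1 a r ih =>
      have hmrg : pvMrg (a :: a :: r) = ((a + a) :: (pvMrg r).1, (a + a) + (pvMrg r).2) := by
        simp [pvMrg]
      rw [pvRunsL_cons, hmrg]
      simp only [List.takeWhile_cons, List.dropWhile_cons, beq_self_eq_true, if_true,
        List.length_cons]
      cases r with
      | nil =>
          simp only [List.takeWhile_nil, List.dropWhile_nil, List.length_nil]
          rw [pvExpandAll_shift a _ 0 _ (by omega), pvExpandAll_zero]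
          simp [pvRunsL, pvExpandAll, pvMrg, two_mul]
      | cons c r' =>
          by_cases hca : c = a
          · subst hca
            simp only [List.takeWhile_cons, List.dropWhile_cons, beq_self_eq_true, if_true,
              List.length_cons]
            rw [pvRunsL_cons] at ih
            rw [pvExpandAll_shift c _ (1 + (List.takeWhile (fun y => y == c) r').length) _
                  (by omega), ih]
            simp [two_mul]
          · have hbx : (c == a) = false := by
              simp only [beq_eq_false_iff_ne]; exact fun h => hca h
            simp only [List.takeWhile_cons, List.dropWhile_cons, hbx, Bool.false_eq_true,
              if_false, List.length_nil]
            rw [pvExpandAll_shift a _ 0 _ (by omega), pvExpandAll_zero, ih]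
            simp [two_mul]
  | case2 a b r hab ih =>
      have hba : (b == a) = false := by
        simp only [beq_eq_false_iff_ne]; exact fun h => hab h.symm
      rw [pvRunsL_cons]
      simp only [List.takeWhile_cons, List.dropWhile_cons, hba, Bool.false_eq_true,
        if_false, List.length_nil]
      simp [pvExpandAll, pvMrg, hab, ih]
  | case3 a =>
      rw [pvRunsL_cons]
      simp [pvExpandAll, pvMrg, pvRunsL]
  | case4 => rw [show pvRunsL ([] : List Int) = [] from by rw [pvRunsL]]; rfl

theorem pvCollapse_eq (row : List (Option Int)) : pvCollapseRow row = pvCollapseAlt row := by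
  unfold pvCollapseRow pvCollapseAlt
  dsimp only
  rw [pvAux_eq, pvPush_foldl, pvExpand_foldl, pvMain]

-- ===== VERDICT (by name: the statement is the Claim_ definition above) =====
theorem reverse_shift_rows_py_spec : Claim_equal_reverse_shift_rows_py := by
  intro rows _
  unfold Spec_reverse_shift_rows_py reverse_shift_rows_py reverse_shift_rows_py_alt
  congr 1
  funext acc row
  dsimp only
  rw [pvCollapse_eq]
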